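-- pv_equiv track=rewrite | github.com/krysx7003/neuro_poc | tools/eval.py | build_simple_context
-- ===== SOURCE A (Python) =====
-- from typing import Any
--
-- def build_simple_context(docs: list[dict[str, Any]], query: str, max_chars: int = 10000) -> str:
--     parts = [f"Pytanie: {query}\n\nDokumenty:\n"]
--     chars = len(parts[0])
--     for i, doc in enumerate(docs, 1):
--         dtype = doc.get("doc_type", "")
--         if dtype == "uodo_decision":
--             sig = doc.get("signature", "?")
--             text = doc.get("content_text", "")[:600]
--             block = f"[{i}] DECYZJA {sig}\n{text}\n"
--         elif dtype == "legal_act_article":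
--             art = doc.get("article_num", "?")
--             text = doc.get("content_text", "")[:600]
--             block = f"[{i}] Art. {art} u.o.d.o.\n{text}\n"
--         else:
--             art = doc.get("article_num", "?")
--             text = doc.get("content_text", "")[:600]
--             block = f"[{i}] Art. {art} RODO\n{text}\n"
--         if chars + len(block) > max_chars:
--             break
--         parts.append(block)
--         chars += len(block)
--     return "\n---\n".join(parts)
-- ===== SOURCE B (Python) =====
-- from typing import Any
--
-- def _format_block(i: int, doc: dict[str, Any]) -> str:
--     dtype = doc.get("doc_type", "")
--     text = doc.get("content_text", "")[:600]
--     if dtype == "uodo_decision":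
--         return f"[{i}] DECYZJA {doc.get('signature', '?')}\n{text}\n"
--     if dtype == "legal_act_article":
--         return f"[{i}] Art. {doc.get('article_num', '?')} u.o.d.o.\n{text}\n"
--     return f"[{i}] Art. {doc.get('article_num', '?')} RODO\n{text}\n"
--
-- def build_simple_context(docs: list[dict[str, Any]], query: str, max_chars: int = 10000) -> str:
--     header = f"Pytanie: {query}\n\nDokumenty:\n"
--     blocks = [_format_block(i, doc) for i, doc in enumerate(docs, 1)]
--     totals = []
--     t = len(header)
--     for b in blocks:
--         t += len(b)
--         totals.append(t)
--     k = 0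
--     while k < len(blocks) and totals[k] <= max_chars:
--         k += 1
--     return "\n---\n".join([header] + blocks[:k])
-- ===== Notes on version B (the rewrite author's own statement) =====
-- stated objective: alternative
-- what changed: A interleaves formatting, character counting and the budget cut-off in one loop with break; B is decomposed into four passes: format every block via a helper, compute cumulative lengths, count the longest prefix whose running total stays within max_chars, then join header plus that prefix.
import Mathlib
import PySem

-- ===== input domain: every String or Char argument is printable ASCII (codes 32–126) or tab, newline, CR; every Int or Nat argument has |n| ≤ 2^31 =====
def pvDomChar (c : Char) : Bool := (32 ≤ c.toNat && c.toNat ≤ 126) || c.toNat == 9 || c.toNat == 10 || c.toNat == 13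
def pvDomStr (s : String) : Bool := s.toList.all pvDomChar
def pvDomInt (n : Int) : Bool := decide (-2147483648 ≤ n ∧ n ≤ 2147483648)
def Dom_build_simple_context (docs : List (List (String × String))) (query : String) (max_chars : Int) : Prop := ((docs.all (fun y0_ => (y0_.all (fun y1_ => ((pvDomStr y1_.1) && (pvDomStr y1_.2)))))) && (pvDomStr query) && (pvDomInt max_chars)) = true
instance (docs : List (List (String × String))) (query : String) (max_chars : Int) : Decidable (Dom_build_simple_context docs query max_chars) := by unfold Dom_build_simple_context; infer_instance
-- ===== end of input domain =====

-- B re-decomposes A's single accumulate-and-break loop into format-all-blocks / cumulative-sums / prefix-count / join passes (objective: alternative; return value only, no side effects).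

-- doc.get(k, dflt): first-match lookup in the association list (shared primitive port)
def pvDictGet (doc : List (String × String)) (k : String) (dflt : String) : String :=
  (PySem.Dict.mk doc).getD k dflt

-- ===== PORT A =====
-- the for-loop of A: state (i, parts, chars), 'break' = return parts
def pvLoopA (docs : List (List (String × String))) (mc : Int) (i : Int)
    (parts : List String) (chars : Int) : List String :=
  match docs with
  | [] => parts
  | doc :: rest =>
    let dtype := pvDictGet doc "doc_type" ""
    let block :=
      if dtype == "uodo_decision" then
        let sig := pvDictGet doc "signature" "?"
        let text := PySem.Str.slice (pvDictGet doc "content_text" "") none (some 600)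
        "[" ++ PySem.Int.toStr i ++ "] DECYZJA " ++ sig ++ "\n" ++ text ++ "\n"
      else if dtype == "legal_act_article" then
        let art := pvDictGet doc "article_num" "?"
        let text := PySem.Str.slice (pvDictGet doc "content_text" "") none (some 600)
        "[" ++ PySem.Int.toStr i ++ "] Art. " ++ art ++ " u.o.d.o.\n" ++ text ++ "\n"
      else
        let art := pvDictGet doc "article_num" "?"
        let text := PySem.Str.slice (pvDictGet doc "content_text" "") none (some 600)
        "[" ++ PySem.Int.toStr i ++ "] Art. " ++ art ++ " RODO\n" ++ text ++ "\n"
    if chars + PySem.Str.len block > mc then parts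
    else pvLoopA rest mc (i + 1) (parts ++ [block]) (chars + PySem.Str.len block)

def build_simple_context (docs : List (List (String × String))) (query : String) (max_chars : Int) : String :=
  let header := "Pytanie: " ++ query ++ "\n\nDokumenty:\n"
  PySem.Str.join "\n---\n" (pvLoopA docs max_chars 1 [header] (PySem.Str.len header))

-- ===== PORT B =====
def pvFmtBlock (i : Int) (doc : List (String × String)) : String :=
  let dtype := pvDictGet doc "doc_type" ""
  let text := PySem.Str.slice (pvDictGet doc "content_text" "") none (some 600)
  if dtype == "uodo_decision" then
    "[" ++ PySem.Int.toStr i ++ "] DECYZJA " ++ pvDictGet doc "signature" "?" ++ "\n" ++ text ++ "\n"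
  else if dtype == "legal_act_article" then
    "[" ++ PySem.Int.toStr i ++ "] Art. " ++ pvDictGet doc "article_num" "?" ++ " u.o.d.o.\n" ++ text ++ "\n"
  else
    "[" ++ PySem.Int.toStr i ++ "] Art. " ++ pvDictGet doc "article_num" "?" ++ " RODO\n" ++ text ++ "\n"

-- [_format_block(i, doc) for i, doc in enumerate(docs, 1)]
def pvMapBlocks (docs : List (List (String × String))) (i : Int) : List String :=
  match docs with
  | [] => []
  | d :: rest => pvFmtBlock i d :: pvMapBlocks rest (i + 1)

-- the cumulative-sums loop over the block lengths
def pvTotals (lens : List Int) (t : Int) : List Int :=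
  match lens with
  | [] => []
  | l :: rest => (t + l) :: pvTotals rest (t + l)

-- the while-loop: length of the prefix of totals that stays ≤ max_chars
def pvCount (totals : List Int) (mc : Int) : Nat :=
  match totals with
  | [] => 0
  | t :: rest => if t ≤ mc then pvCount rest mc + 1 else 0

def build_simple_context_alt (docs : List (List (String × String))) (query : String) (max_chars : Int) : String :=
  let header := "Pytanie: " ++ query ++ "\n\nDokumenty:\n"
  let blocks := pvMapBlocks docs 1
  let totals := pvTotals (blocks.map PySem.Str.len) (PySem.Str.len header)
  let k := pvCount totals max_chars
  PySem.Str.join "\n---\n" (header :: blocks.take k)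

-- ===== PRECONDITION & SPEC =====
def Spec_build_simple_context (docs : List (List (String × String))) (query : String) (max_chars : Int) (out : String) : Prop := out = build_simple_context_alt docs query max_chars
instance (docs : List (List (String × String))) (query : String) (max_chars : Int) (out : String) : Decidable (Spec_build_simple_context docs query max_chars out) := by unfold Spec_build_simple_context; infer_instance

-- ===== CLAIM (what is proved, stated in full; the proofs are below) =====
def Claim_equal_build_simple_context : Prop := ∀ (docs : List (List (String × String))) (query : String) (max_chars : Int), Dom_build_simple_context docs query max_chars → Spec_build_simple_context docs query max_chars (build_simple_context docs query max_chars)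

-- ===== LEMMAS AND PROOFS =====
lemma pvLoopA_cons (d : List (String × String)) (rest : List (List (String × String)))
    (mc i chars : Int) (parts : List String) :
    pvLoopA (d :: rest) mc i parts chars =
      if chars + PySem.Str.len (pvFmtBlock i d) > mc then parts
      else pvLoopA rest mc (i + 1) (parts ++ [pvFmtBlock i d]) (chars + PySem.Str.len (pvFmtBlock i d)) := rfl

lemma pvLoopA_eq (mc : Int) (docs : List (List (String × String))) :
    ∀ (i chars : Int) (parts : List String),
    pvLoopA docs mc i parts chars =
      parts ++ (pvMapBlocks docs i).take
        (pvCount (pvTotals ((pvMapBlocks docs i).map PySem.Str.len) chars) mc) := by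
  induction docs with
  | nil => intro i chars parts; simp [pvLoopA, pvMapBlocks, pvTotals, pvCount]
  | cons d rest ih =>
    intro i chars parts
    rw [pvLoopA_cons]
    have hmap : pvMapBlocks (d :: rest) i = pvFmtBlock i d :: pvMapBlocks rest (i + 1) := rfl
    rw [hmap]
    simp only [List.map_cons, pvTotals, pvCount]
    by_cases h : chars + PySem.Str.len (pvFmtBlock i d) > mc
    · rw [if_pos h, if_neg (by omega)]
      simp
    · rw [if_neg h, if_pos (by omega)]
      rw [ih]
      simp [List.append_assoc]

-- ===== VERDICT (by name: the statement is the Claim_ definition above) =====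
theorem build_simple_context_spec : Claim_equal_build_simple_context := by
  intro docs query max_chars _
  unfold Spec_build_simple_context build_simple_context build_simple_context_alt
  simp only [pvLoopA_eq]
  rfl
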